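-- pv_equiv track=rewrite | github.com/dmi3eva/Sport_py | codeforces/111_C.py | extract_identical
-- ===== SOURCE A (Python) =====
-- def extract_identical(numbers):
--     coordinates = {}
--     identicals = []
--     for _ind, _num in enumerate(numbers):
--         if _num in coordinates.keys():
--             identicals.append((coordinates[_num][-1], _ind))
--         coordinates[_num] = coordinates.get(_num, []) + [_ind]
--     return identicals
-- ===== SOURCE B (Python) =====
-- def extract_identical(numbers):
--     identicals = []
--     for i in range(1, len(numbers)):
--         for j in range(i - 1, -1, -1):
--             if numbers[j] == numbers[i]:
--                 identicals.append((j, i))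
--                 break
--     return identicals
-- ===== Notes on version B (the rewrite author's own statement) =====
-- stated objective: alternative
-- what changed: Replaces A's dict of full position lists (built with quadratic list concatenation) by a dict-free backward scan: for each index i, scan j = i-1..0 for the nearest earlier equal value and emit (j, i).
import Mathlib
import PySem

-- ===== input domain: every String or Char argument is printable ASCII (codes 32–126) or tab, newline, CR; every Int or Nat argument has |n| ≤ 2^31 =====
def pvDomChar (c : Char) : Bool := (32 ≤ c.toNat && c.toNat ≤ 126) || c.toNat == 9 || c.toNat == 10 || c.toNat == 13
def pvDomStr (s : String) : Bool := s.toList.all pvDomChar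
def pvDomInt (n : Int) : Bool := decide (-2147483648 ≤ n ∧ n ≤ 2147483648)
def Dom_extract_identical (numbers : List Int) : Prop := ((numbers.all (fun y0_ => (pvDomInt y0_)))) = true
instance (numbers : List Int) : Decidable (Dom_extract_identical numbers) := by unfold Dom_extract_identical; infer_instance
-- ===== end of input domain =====

-- B replaces A's dict of full position lists (grown by list concatenation) with a dict-free
-- backward scan that finds, for each index, the nearest earlier equal value (objective: alternative).

-- ===== PORT A =====
-- one iteration of A's loop body over (index, value); state = (coordinates, identicals).
-- 'coordinates[_num][-1]' is guarded by the 'in keys()' test, so the getD/pyGetD defaults are never hit.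
def stepA (st : PySem.Dict Int (List Int) × List (Int × Int)) (p : Int × Int) :
    PySem.Dict Int (List Int) × List (Int × Int) :=
  let ids := if st.1.contains p.2 then
      st.2 ++ [(PySem.List.pyGetD (st.1.getD p.2 []) (-1) 0, p.1)]
    else st.2
  (st.1.insert p.2 (st.1.getD p.2 [] ++ [p.1]), ids)

def extract_identical (numbers : List Int) : List (Int × Int) :=
  ((PySem.List.enumerate numbers 0).foldl stepA (PySem.Dict.empty, [])).2

-- ===== PORT B =====
-- inner 'for j in range(i-1, -1, -1): … break' = first j (descending) with numbers[j] == numbers[i]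
def prevIdx (numbers : List Int) (i : Int) : Option Int :=
  (PySem.List.pyRange (i - 1) (-1) (-1)).find?
    (fun j => PySem.List.pyGetD numbers j 0 == PySem.List.pyGetD numbers i 0)

def extract_identical_alt (numbers : List Int) : List (Int × Int) :=
  (PySem.List.pyRange 1 (PySem.List.len numbers)).foldl
    (fun res i =>
      match prevIdx numbers i with
      | some j => res ++ [(j, i)]
      | none => res) []

-- ===== PRECONDITION & SPEC =====
def Spec_extract_identical (numbers : List Int) (out : List (Int × Int)) : Prop := out = extract_identical_alt numbers
instance (numbers : List Int) (out : List (Int × Int)) : Decidable (Spec_extract_identical numbers out) := by unfold Spec_extract_identical; infer_instance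

-- ===== CLAIM (what is proved, stated in full; the proofs are below) =====
def Claim_equal_extract_identical : Prop := ∀ (numbers : List Int), Dom_extract_identical numbers → Spec_extract_identical numbers (extract_identical numbers)

-- ===== LEMMAS AND PROOFS =====

-- positions (as Python ints) at which value v occurs in xs
def posOf (xs : List Int) (v : Int) : List Int :=
  (PySem.List.pyRange 0 (xs.length : Int)).filter
    (fun j => PySem.List.pyGetD xs j 0 == v)

def foldA (xs : List Int) : PySem.Dict Int (List Int) × List (Int × Int) :=
  (PySem.List.enumerate xs 0).foldl stepA (PySem.Dict.empty, [])

theorem extract_identical_eq_foldA (xs : List Int) :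
    extract_identical xs = (foldA xs).2 := rfl

theorem find?_eq_head?_filter {α : Type} (p : α → Bool) (l : List α) :
    l.find? p = (l.filter p).head? := by
  induction l with
  | nil => rfl
  | cons a t ih =>
    rw [List.find?_cons, List.filter_cons]
    cases hp : p a
    · rw [if_neg (by simp)]
      exact ih
    · rw [if_pos rfl, List.head?_cons]

theorem pyGetD_append_left (xs : List Int) (x j : Int) (h0 : 0 ≤ j) (h1 : j < (xs.length : Int)) :
    PySem.List.pyGetD (xs ++ [x]) j 0 = PySem.List.pyGetD xs j 0 := by
  have hN : j.toNat < xs.length := by omega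
  have h1' : j < ((xs ++ [x]).length : Int) := by
    simp only [List.length_append, List.length_cons, List.length_nil]
    push_cast
    omega
  rw [PySem.List.pyGetD_eq_getElem (xs ++ [x]) 0 h0 h1',
      PySem.List.pyGetD_eq_getElem xs 0 h0 h1]
  exact List.getElem_append_left hN

theorem pyGetD_append_last (xs : List Int) (x : Int) :
    PySem.List.pyGetD (xs ++ [x]) (xs.length : Int) 0 = x := by
  have h1 : ((xs.length : Int)) < ((xs ++ [x]).length : Int) := by
    simp only [List.length_append, List.length_cons, List.length_nil]
    push_cast
    omega
  rw [PySem.List.pyGetD_eq_getElem (xs ++ [x]) 0 (by positivity) h1]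
  simp

theorem find?_congr_mem {α : Type} (l : List α) (p q : α → Bool)
    (h : ∀ a ∈ l, p a = q a) : l.find? p = l.find? q := by
  rw [find?_eq_head?_filter, find?_eq_head?_filter, List.filter_congr h]

theorem posOf_nil (v : Int) : posOf [] v = [] := by
  simp [posOf, PySem.List.pyRange_one_eq_nil]

theorem posOf_snoc (xs : List Int) (x v : Int) :
    posOf (xs ++ [x]) v = posOf xs v ++ (if x == v then [(xs.length : Int)] else []) := by
  unfold posOf
  have hlen : ((xs ++ [x]).length : Int) = (xs.length : Int) + 1 := by
    simp
  rw [hlen, PySem.List.pyRange_one_succ_right (by positivity), List.filter_append]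
  congr 1
  · apply List.filter_congr
    intro j hj
    have hj' := (PySem.List.mem_pyRange_one).1 hj
    rw [pyGetD_append_left xs x j hj'.1 hj'.2]
  · rw [List.filter_cons]
    rw [pyGetD_append_last]
    cases hx : (x == v) <;> simp

theorem mem_iff_posOf_ne_nil (xs : List Int) (x : Int) : x ∈ xs ↔ posOf xs x ≠ [] := by
  induction xs using List.reverseRecOn with
  | nil => simp [posOf_nil]
  | append_singleton t y ih =>
    rw [posOf_snoc]
    by_cases h : y = x
    · subst h
      simp
    · have h' : x ≠ y := fun e => h e.symm
      simp [h, h', ih]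

theorem foldA_snoc (xs : List Int) (x : Int) :
    foldA (xs ++ [x]) = stepA (foldA xs) ((xs.length : Int), x) := by
  unfold foldA
  rw [PySem.List.enumerate_append, List.foldl_append]
  simp [PySem.List.enumerate]

theorem foldA_fst_getD (xs : List Int) (v : Int) :
    (foldA xs).1.getD v [] = posOf xs v := by
  induction xs using List.reverseRecOn generalizing v with
  | nil => simp [foldA, PySem.List.enumerate, posOf_nil, PySem.Dict.getD_empty]
  | append_singleton t y ih =>
    rw [foldA_snoc, posOf_snoc]
    show ((foldA t).1.insert y ((foldA t).1.getD y [] ++ [(t.length : Int)])).getD v [] = _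
    rw [PySem.Dict.getD_insert]
    by_cases h : v = y
    · subst h
      simp [ih]
    · simp [h, Ne.symm h, ih]

theorem foldA_fst_contains (xs : List Int) (v : Int) :
    (foldA xs).1.contains v = decide (v ∈ xs) := by
  induction xs using List.reverseRecOn generalizing v with
  | nil => simp [foldA, PySem.List.enumerate, PySem.Dict.contains_empty]
  | append_singleton t y ih =>
    rw [foldA_snoc]
    show ((foldA t).1.insert y _).contains v = _
    rw [PySem.Dict.contains_insert, ih]
    by_cases h : v = y <;> simp [h]

theorem A_snoc (xs : List Int) (x : Int) :
    extract_identical (xs ++ [x]) =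
      extract_identical xs ++
        (match (posOf xs x).getLast? with
         | some j => [(j, (xs.length : Int))]
         | none => []) := by
  rw [extract_identical_eq_foldA, extract_identical_eq_foldA, foldA_snoc]
  show (if (foldA xs).1.contains x then
          (foldA xs).2 ++ [(PySem.List.pyGetD ((foldA xs).1.getD x []) (-1) 0, (xs.length : Int))]
        else (foldA xs).2) = _
  rw [foldA_fst_contains, foldA_fst_getD]
  by_cases h : x ∈ xs
  · have hne : posOf xs x ≠ [] := (mem_iff_posOf_ne_nil xs x).1 h
    rw [PySem.List.pyGetD_neg_one _ _ hne]
    simp [h, List.getLast?_eq_getLast_of_ne_nil hne]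
  · have hnil : posOf xs x = [] := by
      by_contra hne
      exact h ((mem_iff_posOf_ne_nil xs x).2 hne)
    simp [h, hnil]

theorem prevIdx_append (xs : List Int) (x i : Int) (h1 : 0 ≤ i) (h2 : i < (xs.length : Int)) :
    prevIdx (xs ++ [x]) i = prevIdx xs i := by
  unfold prevIdx
  rw [pyGetD_append_left xs x i h1 h2]
  apply find?_congr_mem
  intro j hj
  have hj' := (PySem.List.mem_pyRange_neg_one).1 hj
  rw [pyGetD_append_left xs x j (by omega) (by omega)]

theorem prevIdx_last (xs : List Int) (x : Int) :
    prevIdx (xs ++ [x]) (xs.length : Int) = (posOf xs x).getLast? := by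
  unfold prevIdx
  rw [pyGetD_append_last]
  have hr : PySem.List.pyRange ((xs.length : Int) - 1) (-1) (-1) =
      (PySem.List.pyRange 0 (xs.length : Int)).reverse := by
    rw [PySem.List.pyRange_neg_one_eq_reverse]
    norm_num
  rw [hr, find?_eq_head?_filter, List.filter_reverse, List.head?_reverse]
  unfold posOf
  congr 1
  apply List.filter_congr
  intro j hj
  have hj' := (PySem.List.mem_pyRange_one).1 hj
  rw [pyGetD_append_left xs x j hj'.1 hj'.2]

theorem B_nil : extract_identical_alt [] = [] := by
  simp [extract_identical_alt, PySem.List.pyRange_one_eq_nil]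

theorem B_snoc (xs : List Int) (x : Int) :
    extract_identical_alt (xs ++ [x]) =
      extract_identical_alt xs ++
        (match (posOf xs x).getLast? with
         | some j => [(j, (xs.length : Int))]
         | none => []) := by
  rcases eq_or_ne xs [] with rfl | hne
  · rw [B_nil, posOf_nil]
    simp [extract_identical_alt, PySem.List.pyRange_one_eq_nil]
  · have hlen : 1 ≤ (xs.length : Int) := by
      have := List.length_pos_iff.2 hne
      omega
    unfold extract_identical_alt
    have hl : PySem.List.len (xs ++ [x]) = (xs.length : Int) + 1 := by simp
    rw [hl, PySem.List.pyRange_one_succ_right hlen, List.foldl_append]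
    have hcongr :
        List.foldl (fun res i =>
            match prevIdx (xs ++ [x]) i with
            | some j => res ++ [(j, i)]
            | none => res) ([] : List (Int × Int)) (PySem.List.pyRange 1 (xs.length : Int)) =
        List.foldl (fun res i =>
            match prevIdx xs i with
            | some j => res ++ [(j, i)]
            | none => res) ([] : List (Int × Int)) (PySem.List.pyRange 1 (xs.length : Int)) := by
      apply PySem.List.foldl_congr_mem
      intro acc i hi
      have hi' := (PySem.List.mem_pyRange_one).1 hi
      rw [prevIdx_append xs x i (by omega) hi'.2]
    rw [hcongr, PySem.List.len_eq]
    simp only [List.foldl_cons, List.foldl_nil]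
    rw [prevIdx_last]
    cases (posOf xs x).getLast? <;> simp

-- ===== VERDICT (by name: the statement is the Claim_ definition above) =====
theorem eq_alt (numbers : List Int) : extract_identical numbers = extract_identical_alt numbers := by
  induction numbers using List.reverseRecOn with
  | nil => rw [B_nil]; rfl
  | append_singleton t y ih => rw [A_snoc, B_snoc, ih]

theorem extract_identical_spec : Claim_equal_extract_identical := by
  intro numbers _
  unfold Spec_extract_identical
  exact eq_alt numbers
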